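-- pv_equiv track=rewrite | github.com/manwelja/advent-of-code | 2023/Day 9/test.py | getLastDifferences
-- ===== SOURCE A (Python) =====
-- def getLastDifferences(sequence):
--     lastDifferences = []
--
--     while True:
--         newSequence = []
--
--         for i in range(len(sequence) - 1):
--             newSequence.append(sequence[i+1] - sequence[i])
--
--         lastDifferences.append(newSequence[-1])
--         sequence = newSequence
--
--         if sum(sequence) == 0:
--             return sum(lastDifferences);
-- ===== SOURCE B (Python) =====
-- def getLastDifferences(sequence):
--     newSequence = [sequence[i + 1] - sequence[i] for i in range(len(sequence) - 1)]
--     if sum(newSequence) == 0: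
--         return newSequence[-1]
--     return newSequence[-1] + getLastDifferences(newSequence)
-- ===== Notes on version B (the rewrite author's own statement) =====
-- stated objective: simpler
-- what changed: Replaces the while-loop that maintains a lastDifferences accumulator list (summed at the end) with direct structural recursion on the difference row, adding each row's last element on the way out of the call stack.
import Mathlib
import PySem

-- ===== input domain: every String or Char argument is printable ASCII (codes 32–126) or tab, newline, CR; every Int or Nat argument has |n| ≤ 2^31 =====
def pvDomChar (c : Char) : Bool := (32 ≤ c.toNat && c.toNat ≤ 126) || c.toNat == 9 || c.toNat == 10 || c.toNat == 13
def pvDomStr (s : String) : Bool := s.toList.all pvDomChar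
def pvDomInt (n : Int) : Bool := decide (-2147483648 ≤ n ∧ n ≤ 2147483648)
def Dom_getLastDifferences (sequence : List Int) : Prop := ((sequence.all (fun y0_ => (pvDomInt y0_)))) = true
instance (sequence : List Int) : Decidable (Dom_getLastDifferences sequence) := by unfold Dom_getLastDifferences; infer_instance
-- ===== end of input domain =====

-- B replaces A's while-loop and accumulator list with direct recursion on the difference row (same cost).
-- ===== PORT A =====
-- A's while-loop, with fuel = sequence.length (the loop runs at most that often before Python raises;
-- fuel 0 / an empty difference row correspond to A's IndexError, excluded by Pre_).
def pvGoA : Nat → List Int → List Int → Int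
  | 0, _, _ => 0
  | fuel+1, sequence, lastDifferences =>
    let newSequence := (PySem.List.pyRange 0 ((sequence.length : Int) - 1) 1).foldl
      (fun ns i => ns ++ [PySem.List.pyGetD sequence (i+1) 0 - PySem.List.pyGetD sequence i 0]) []
    let lastDifferences := lastDifferences ++ [PySem.List.pyGetD newSequence (-1) 0]
    if newSequence.sum = 0 then lastDifferences.sum
    else pvGoA fuel newSequence lastDifferences

def getLastDifferences (sequence : List Int) : Int :=
  pvGoA sequence.length sequence []

-- ===== PORT B =====
def getLastDifferences_alt (sequence : List Int) : Int :=
  let newSequence := (PySem.List.pyRange 0 ((sequence.length : Int) - 1) 1).map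
      (fun i => PySem.List.pyGetD sequence (i+1) 0 - PySem.List.pyGetD sequence i 0)
  if _h : newSequence.sum = 0 then PySem.List.pyGetD newSequence (-1) 0
  else PySem.List.pyGetD newSequence (-1) 0 + getLastDifferences_alt newSequence
termination_by sequence.length
decreasing_by
  have hne : newSequence ≠ [] := by intro he; exact _h (by simp [he])
  have hpos : 0 < newSequence.length := List.length_pos_of_ne_nil hne
  simp only [newSequence, List.length_map, PySem.List.length_pyRange_one] at hpos ⊢
  omega

-- ===== PRECONDITION & SPEC =====
-- the canonical difference row, used only to state Pre_
def pvDiff (s : List Int) : List Int := List.zipWith (fun a b => b - a) s s.tail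
def pvIter : Nat → List Int → List Int
  | 0, s => s
  | k+1, s => pvIter k (pvDiff s)

-- Pre_ excludes exactly the inputs on which A raises IndexError (newSequence[-1] on an empty row):
-- A returns normally iff some k-th finite-difference row (1 ≤ k < len) sums to zero.
def Pre_getLastDifferences (sequence : List Int) : Prop :=
  ∃ k ∈ List.range sequence.length, 1 ≤ k ∧ (pvIter k sequence).sum = 0
instance (sequence : List Int) : Decidable (Pre_getLastDifferences sequence) := by
  unfold Pre_getLastDifferences; infer_instance

def pvWitness_getLastDifferences : List Int := [1, 2, 3]

def Spec_getLastDifferences (sequence : List Int) (out : Int) : Prop := out = getLastDifferences_alt sequence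
instance (sequence : List Int) (out : Int) : Decidable (Spec_getLastDifferences sequence out) := by unfold Spec_getLastDifferences; infer_instance

-- ===== CLAIM (what is proved, stated in full; the proofs are below) =====
def Claim_equal_getLastDifferences : Prop := ∀ (sequence : List Int), Dom_getLastDifferences sequence → Pre_getLastDifferences sequence → Spec_getLastDifferences sequence (getLastDifferences sequence)

-- ===== LEMMAS AND PROOFS =====
lemma pvFoldl_append_map (f : Int → Int) :
    ∀ (l : List Int) (a : List Int), l.foldl (fun ns i => ns ++ [f i]) a = a ++ l.map f := by
  intro l
  induction l with
  | nil => simp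
  | cons x xs ih => intro a; simp [List.foldl, ih]

lemma pvLength_diff (s : List Int) : (pvDiff s).length = s.length - 1 := by
  simp [pvDiff, List.length_tail]

lemma pvMap_range_eq_diff (s : List Int) :
    (PySem.List.pyRange 0 ((s.length : Int) - 1) 1).map
      (fun i => PySem.List.pyGetD s (i+1) 0 - PySem.List.pyGetD s i 0) = pvDiff s := by
  rw [PySem.List.pyRange_one]
  apply List.ext_getElem
  · simp [pvLength_diff]
  · intro i h1 h2
    have hlen : i < s.length - 1 := by simpa [pvLength_diff] using h2
    have hi : i < s.length := by omega
    have hi1 : i + 1 < s.length := by omega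
    have htail : i < s.tail.length := by simp [List.length_tail]; omega
    simp only [List.getElem_map, List.getElem_range, pvDiff, List.getElem_zipWith,
      List.getElem_tail]
    rw [show (0 : Int) + (i : Nat) + 1 = (((i + 1 : Nat)) : Int) by push_cast; ring,
       show (0 : Int) + (i : Nat) = ((i : Nat) : Int) by ring,
       PySem.List.pyGetD_natCast, PySem.List.pyGetD_natCast,
       List.getD_eq_getElem s 0 hi1, List.getD_eq_getElem s 0 hi]

lemma pvGo_eq : ∀ (fuel : Nat) (s acc : List Int),
    (∃ k, 1 ≤ k ∧ k ≤ fuel ∧ k < s.length ∧ (pvIter k s).sum = 0) →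
    pvGoA fuel s acc = acc.sum + getLastDifferences_alt s := by
  intro fuel
  induction fuel with
  | zero => intro s acc ⟨k, h1, h2, _, _⟩; omega
  | succ fuel ih =>
    intro s acc ⟨k, hk1, hkf, hkl, hsum⟩
    have hs2 : 2 ≤ s.length := by omega
    rw [getLastDifferences_alt]
    simp only [pvGoA, pvFoldl_append_map, List.nil_append, pvMap_range_eq_diff]
    by_cases h : (pvDiff s).sum = 0
    · simp [h, List.sum_append]
    · have hrec := ih (pvDiff s) (acc ++ [PySem.List.pyGetD (pvDiff s) (-1) 0])
        ⟨k - 1, by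
          rcases Nat.lt_or_ge k 2 with hlt | hge
          · interval_cases k
            · exact absurd (by simpa [pvIter] using hsum) h
          · omega,
         by omega, by rw [pvLength_diff]; omega,
         by
           have hit : pvIter k s = pvIter (k - 1) (pvDiff s) := by
             conv_lhs => rw [show k = (k - 1) + 1 by
               rcases Nat.lt_or_ge k 2 with hlt | hge
               · interval_cases k
                 · exact absurd (by simpa [pvIter] using hsum) h
               · omega]
             rfl
           rw [← hit]; exact hsum⟩
      rw [if_neg h, dif_neg h, hrec, List.sum_append]
      simp [add_assoc]

-- ===== VERDICT (by name: the statement is the Claim_ definition above) =====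
theorem getLastDifferences_spec : Claim_equal_getLastDifferences := by
  intro s _ hpre
  obtain ⟨k, hk, hk1, hsum⟩ := hpre
  have hkl : k < s.length := List.mem_range.mp hk
  unfold Spec_getLastDifferences getLastDifferences
  rw [pvGo_eq s.length s [] ⟨k, hk1, by omega, hkl, hsum⟩]
  simp
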